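-- pv_equiv track=rewrite | github.com/Ted-Nadeau/piper-morgan-product | services/publishing/publisher.py | _parse_adr_metadata
-- ===== SOURCE A (Python) =====
-- from typing import Any, Dict, Optional
--
-- def _parse_adr_metadata(content: str) -> Dict[str, Any]:
--     """
--     Parse ADR metadata from markdown content.
--
--     Args:
--         content: Markdown content
--
--     Returns:
--         Dictionary with ADR metadata fields
--     """
--     lines = content.split("\n")
--     metadata = {
--         "title": "Untitled",
--         "number": "Unknown",
--         "status": "Accepted",
--         "date": None,
--         "author": "System",
--     }
--
--     for line in lines:
--         line = line.strip()
--
--         # Extract title and number from H1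
--         if line.startswith("# ADR-"):
--             # Format: # ADR-XXX: Title
--             parts = line[2:].split(":", 1)
--             if len(parts) == 2:
--                 adr_part = parts[0].strip()
--                 title_part = parts[1].strip()
--
--                 # Extract number from ADR-XXX
--                 if adr_part.startswith("ADR-"):
--                     metadata["number"] = adr_part[4:]
--
--                 metadata["title"] = title_part
--
--         # Extract status
--         elif line.startswith("**Status:**") or line.startswith("Status:"):
--             status = line.split(":", 1)[1].strip().replace("*", "")
--             if status:
--                 # Normalize status values
--                 status_lower = status.lower()
--                 if status_lower in [
--                     "proposed",
--                     "draft",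
--                     "accepted",
--                     "implemented",
--                     "deprecated",
--                 ]:
--                     metadata["status"] = status.capitalize()
--                 elif status_lower in ["superseded", "rejected"]:
--                     metadata["status"] = status.capitalize()
--                 else:
--                     metadata["status"] = "Accepted"  # Default
--
--         # Extract date
--         elif line.startswith("**Date:**") or line.startswith("Date:"):
--             date_str = line.split(":", 1)[1].strip().replace("*", "")
--             if date_str:
--                 metadata["date"] = date_str.strip()
--
--         # Extract author/decision maker
--         elif (
--             line.startswith("**Decision Maker:**")
--             or line.startswith("Decision Maker:")
--             or line.startswith("**Author:**")
--             or line.startswith("Author:")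
--         ):
--             author = line.split(":", 1)[1].strip().replace("*", "")
--             if author:
--                 metadata["author"] = author.strip()
--
--     return metadata
-- ===== SOURCE B (Python) =====
-- def _parse_adr_metadata(content: str):
--     """Per-field extraction: for each metadata field find the LAST line that would
--     set it (the loop in the original is last-write-wins over disjoint prefixes),
--     then normalize exactly once."""
--     lines = [l.strip() for l in content.split("\n")]
--
--     def last(pred):
--         for l in reversed(lines):
--             if pred(l):
--                 return l
--         return None
--
--     def val(l):
--         return l.split(":", 1)[1].strip().replace("*", "")
--
--     metadata = {
--         "title": "Untitled",
--         "number": "Unknown",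
--         "status": "Accepted",
--         "date": None,
--         "author": "System",
--     }
--
--     h1 = last(lambda l: l.startswith("# ADR-") and ":" in l)
--     if h1 is not None:
--         adr, title = h1[2:].split(":", 1)
--         metadata["title"] = title.strip()
--         metadata["number"] = adr.strip()[4:]
--
--     st = last(lambda l: (l.startswith("**Status:**") or l.startswith("Status:")) and val(l))
--     if st is not None:
--         s = val(st)
--         if s.lower() in ("proposed", "draft", "accepted", "implemented",
--                          "deprecated", "superseded", "rejected"):
--             metadata["status"] = s.capitalize()
--         else:
--             metadata["status"] = "Accepted"
--
--     dt = last(lambda l: (l.startswith("**Date:**") or l.startswith("Date:")) and val(l))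
--     if dt is not None:
--         metadata["date"] = val(dt).strip()
--
--     au = last(lambda l: (l.startswith("**Decision Maker:**") or l.startswith("Decision Maker:")
--                          or l.startswith("**Author:**") or l.startswith("Author:")) and val(l))
--     if au is not None:
--         metadata["author"] = val(au).strip()
--
--     return metadata
-- ===== Notes on version B (the rewrite author's own statement) =====
-- stated objective: alternative
-- what changed: Replaces the single stateful last-write-wins line loop by independent per-field extraction: for each metadata field B searches the reversed stripped lines for the last line that would set it, and applies the normalization once to that line.
import Mathlib
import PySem

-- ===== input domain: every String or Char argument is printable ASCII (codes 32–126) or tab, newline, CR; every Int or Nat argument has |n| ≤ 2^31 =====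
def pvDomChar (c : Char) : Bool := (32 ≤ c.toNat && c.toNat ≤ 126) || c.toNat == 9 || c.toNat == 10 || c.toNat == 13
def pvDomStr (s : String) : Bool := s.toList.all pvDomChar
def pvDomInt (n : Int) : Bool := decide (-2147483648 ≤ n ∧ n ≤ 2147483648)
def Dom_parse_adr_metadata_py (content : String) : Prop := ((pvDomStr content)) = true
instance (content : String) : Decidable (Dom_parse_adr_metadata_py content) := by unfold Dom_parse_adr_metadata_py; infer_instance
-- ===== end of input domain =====

-- B replaces the single stateful line loop by per-field extraction of the LAST matching line (alternative decomposition, same cost).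

-- ===== PORT A =====
-- A's dict has five fixed keys; it is ported as a five-field structure updated in
-- place and returned as the assoc list in the dict's insertion order.
structure AdrMeta where
  title : List Char
  number : List Char
  status : List Char
  date : Option (List Char)
  author : List Char
deriving Repr, DecidableEq

-- str.capitalize: first char uppercased, the rest lowered (exact on the ASCII domain)
def pvCapitalize (s : List Char) : List Char :=
  match s with
  | [] => []
  | c :: cs => PySem.Chars.upperChar c :: PySem.Chars.lower cs

-- one iteration of A's `for line in lines` (line[2:], adr_part[4:]: nonnegative
-- index slices = List.drop; `if len(parts) == 2` = the two-element match arm)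
def stepA (m : AdrMeta) (rawline : List Char) : AdrMeta :=
  let line := PySem.Chars.strip rawline
  if PySem.Chars.startswith line "# ADR-".toList then
    match PySem.Chars.splitOnMax (line.drop 2) [':'] 1 with  -- line[2:].split(":", 1)
    | [p0, p1] =>
      let adr_part := PySem.Chars.strip p0
      let title_part := PySem.Chars.strip p1
      let m := if PySem.Chars.startswith adr_part "ADR-".toList then
                 { m with number := adr_part.drop 4 } else m
      { m with title := title_part }
    | _ => m
  else if PySem.Chars.startswith line "**Status:**".toList || PySem.Chars.startswith line "Status:".toList then
    match PySem.Chars.splitOnMax line [':'] 1 with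
    | [_, p1] =>
      let status := PySem.Chars.replace (PySem.Chars.strip p1) ['*'] []
      if status ≠ [] then
        let status_lower := PySem.Chars.lower status
        if status_lower ∈ ["proposed".toList, "draft".toList, "accepted".toList,
                           "implemented".toList, "deprecated".toList] then
          { m with status := pvCapitalize status }
        else if status_lower ∈ ["superseded".toList, "rejected".toList] then
          { m with status := pvCapitalize status }
        else
          { m with status := "Accepted".toList }
      else m
    | _ => m  -- unreachable: the matched prefix contains ':'
  else if PySem.Chars.startswith line "**Date:**".toList || PySem.Chars.startswith line "Date:".toList then
    match PySem.Chars.splitOnMax line [':'] 1 with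
    | [_, p1] =>
      let date_str := PySem.Chars.replace (PySem.Chars.strip p1) ['*'] []
      if date_str ≠ [] then { m with date := some (PySem.Chars.strip date_str) } else m
    | _ => m  -- unreachable
  else if PySem.Chars.startswith line "**Decision Maker:**".toList ||
          PySem.Chars.startswith line "Decision Maker:".toList ||
          PySem.Chars.startswith line "**Author:**".toList ||
          PySem.Chars.startswith line "Author:".toList then
    match PySem.Chars.splitOnMax line [':'] 1 with
    | [_, p1] =>
      let author := PySem.Chars.replace (PySem.Chars.strip p1) ['*'] []
      if author ≠ [] then { m with author := PySem.Chars.strip author } else m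
    | _ => m  -- unreachable
  else m

def parse_adr_metadata_py (content : String) : List (String × Option String) :=
  let lines := PySem.Chars.splitOn content.toList ['\n']
  let m := lines.foldl stepA
    ⟨"Untitled".toList, "Unknown".toList, "Accepted".toList, none, "System".toList⟩
  [("title", some (String.ofList m.title)), ("number", some (String.ofList m.number)),
   ("status", some (String.ofList m.status)), ("date", m.date.map String.ofList),
   ("author", some (String.ofList m.author))]

-- ===== PORT B =====
-- lines = [l.strip() for l in content.split("\n")]
def pvLines (content : String) : List (List Char) :=
  (PySem.Chars.splitOn content.toList ['\n']).map PySem.Chars.strip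

-- last(pred): first match scanning the lines in reverse
def pvLast (p : List Char → Bool) (lines : List (List Char)) : Option (List Char) :=
  List.find? p lines.reverse

-- val(l) = l.split(":", 1)[1].strip().replace("*", "")
def pvValOf (l : List Char) : List Char :=
  match PySem.Chars.splitOnMax l [':'] 1 with
  | [_, p1] => PySem.Chars.replace (PySem.Chars.strip p1) ['*'] []
  | _ => []  -- unreachable under the predicates below: the prefix contains ':'

def pvTitlePred (l : List Char) : Bool :=
  PySem.Chars.startswith l "# ADR-".toList && PySem.Chars.isIn [':'] l

def pvStatusPred (l : List Char) : Bool :=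
  (PySem.Chars.startswith l "**Status:**".toList || PySem.Chars.startswith l "Status:".toList)
    && !(pvValOf l).isEmpty

def pvDatePred (l : List Char) : Bool :=
  (PySem.Chars.startswith l "**Date:**".toList || PySem.Chars.startswith l "Date:".toList)
    && !(pvValOf l).isEmpty

def pvAuthorPred (l : List Char) : Bool :=
  (PySem.Chars.startswith l "**Decision Maker:**".toList ||
   PySem.Chars.startswith l "Decision Maker:".toList ||
   PySem.Chars.startswith l "**Author:**".toList ||
   PySem.Chars.startswith l "Author:".toList)
    && !(pvValOf l).isEmpty

-- adr, title = h1[2:].split(":", 1); title.strip(), adr.strip()[4:]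
def pvTitleOut (l : List Char) : List Char × List Char :=
  match PySem.Chars.splitOnMax (l.drop 2) [':'] 1 with
  | [adr, t] => (PySem.Chars.strip t, (PySem.Chars.strip adr).drop 4)
  | _ => ("Untitled".toList, "Unknown".toList)  -- unreachable: pvTitlePred guarantees a colon

def pvStatusOut (l : List Char) : List Char :=
  let s := pvValOf l
  if PySem.Chars.lower s ∈ ["proposed".toList, "draft".toList, "accepted".toList,
      "implemented".toList, "deprecated".toList, "superseded".toList, "rejected".toList] then
    pvCapitalize s
  else "Accepted".toList

-- val(l).strip()
def pvStripVal (l : List Char) : List Char := PySem.Chars.strip (pvValOf l)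

def parse_adr_metadata_py_alt (content : String) : List (String × Option String) :=
  let lines := pvLines content
  let tn := match pvLast pvTitlePred lines with
            | some l => pvTitleOut l
            | none => ("Untitled".toList, "Unknown".toList)
  let status := match pvLast pvStatusPred lines with
                | some l => pvStatusOut l
                | none => "Accepted".toList
  let date := match pvLast pvDatePred lines with
              | some l => some (pvStripVal l)
              | none => none
  let author := match pvLast pvAuthorPred lines with
                | some l => pvStripVal l
                | none => "System".toList
  [("title", some (String.ofList tn.1)), ("number", some (String.ofList tn.2)),
   ("status", some (String.ofList status)), ("date", date.map String.ofList),
   ("author", some (String.ofList author))]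

-- ===== PRECONDITION & SPEC =====
def Spec_parse_adr_metadata_py (content : String) (out : List (String × Option String)) : Prop := out = parse_adr_metadata_py_alt content
instance (content : String) (out : List (String × Option String)) : Decidable (Spec_parse_adr_metadata_py content out) := by unfold Spec_parse_adr_metadata_py; infer_instance

-- ===== CLAIM (what is proved, stated in full; the proofs are below) =====
def Claim_equal_parse_adr_metadata_py : Prop := ∀ (content : String), Dom_parse_adr_metadata_py content → Spec_parse_adr_metadata_py content (parse_adr_metadata_py content)

-- ===== LEMMAS AND PROOFS =====

lemma go_zero (sep : List Char) (fuel : Nat) (l cur : List Char) (acc : List (List Char)) :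
    PySem.Chars.splitOnMax.go sep fuel 0 l cur acc = ((cur.reverse ++ l) :: acc).reverse := by
  cases fuel with
  | zero => simp [PySem.Chars.splitOnMax.go]
  | succ n => cases l <;> simp [PySem.Chars.splitOnMax.go]

lemma go_one (c : Char) : ∀ (fuel : Nat) (l : List Char), l.length < fuel → ∀ (cur : List Char) (acc : List (List Char)),
    PySem.Chars.splitOnMax.go [c] fuel 1 l cur acc =
      if c ∈ l then
        (((cur.reverse ++ l.takeWhile (fun a => !(a == c))) :: acc).reverse)
          ++ [(l.dropWhile (fun a => !(a == c))).tail]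
      else ((cur.reverse ++ l) :: acc).reverse := by
  intro fuel
  induction fuel with
  | zero => intro l h; omega
  | succ n ih =>
    intro l h cur acc
    cases l with
    | nil => simp [PySem.Chars.splitOnMax.go]
    | cons a t =>
      simp only [PySem.Chars.splitOnMax.go]
      by_cases hac : a = c
      · subst hac
        have hpre : [a].isPrefixOf (a :: t) = true := by simp [List.isPrefixOf]
        simp [hpre, go_zero]
      · have hac2 : a ≠ c := hac
        have hpre : [c].isPrefixOf (a :: t) = false := by
          simp [List.isPrefixOf]; exact fun h => absurd h.symm hac2
        have hlen : t.length < n := by simpa using h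
        simp only [hpre, if_false, Bool.false_eq_true, ih t hlen (a :: cur) acc]
        by_cases hm : c ∈ t
        · simp [hm, hac, Ne.symm hac2]
        · simp [hm, Ne.symm hac2]

lemma splitOnMax_single (c : Char) (s : List Char) :
    PySem.Chars.splitOnMax s [c] 1 =
      if c ∈ s then [s.takeWhile (fun a => !(a == c)), (s.dropWhile (fun a => !(a == c))).tail]
      else [s] := by
  unfold PySem.Chars.splitOnMax
  rw [if_neg (by omega)]
  simp only [show (1 : Int).toNat = 1 from rfl]
  rw [go_one c (s.length + 1) s (by omega) [] []]
  split <;> simp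

lemma prefix_excl {p q s : List Char} (hp : p.isPrefixOf s = true)
    (h1 : p.isPrefixOf q = false) (h2 : q.isPrefixOf p = false) :
    q.isPrefixOf s = false := by
  rw [List.isPrefixOf_iff_prefix] at hp
  by_contra h
  simp only [Bool.not_eq_false, List.isPrefixOf_iff_prefix] at h
  rcases List.prefix_or_prefix_of_prefix hp h with h' | h'
  · rw [← List.isPrefixOf_iff_prefix] at h'; simp [h'] at h1
  · rw [← List.isPrefixOf_iff_prefix] at h'; simp [h'] at h2

lemma mem_of_prefix {pre l : List Char} (h : pre.isPrefixOf l = true) (hc : ':' ∈ pre) : ':' ∈ l := by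
  rw [List.isPrefixOf_iff_prefix] at h
  obtain ⟨t, rfl⟩ := h
  exact List.mem_append.mpr (Or.inl hc)

lemma isIn_colon (l : List Char) : PySem.Chars.isIn [':'] l = (':' ∈ l : Bool) := by
  by_cases h : ':' ∈ l
  · simp [h, PySem.Chars.isIn_iff_infix, (List.singleton_infix_iff ':' l).mpr h]
  · simp [h]
    rw [PySem.Chars.isIn_eq_false_iff]
    exact fun hc => h ((List.singleton_infix_iff ':' l).mp hc)

lemma rstrip_adr (u : List Char) : ∃ v, PySem.Chars.rstrip ("ADR-".toList ++ u) = "ADR-".toList ++ v := by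
  unfold PySem.Chars.rstrip
  rw [List.reverse_append, List.dropWhile_append]
  split
  · exact ⟨[], by decide⟩
  · exact ⟨(List.dropWhile PySem.Chars.isspace u.reverse).reverse,
      by rw [List.reverse_append, List.reverse_reverse]⟩

lemma strip_adr (u : List Char) : ∃ v, PySem.Chars.strip ("ADR-".toList ++ u) = "ADR-".toList ++ v := by
  unfold PySem.Chars.strip
  have : PySem.Chars.lstrip ("ADR-".toList ++ u) = "ADR-".toList ++ u := by
    simp [PySem.Chars.lstrip, show PySem.Chars.isspace 'A' = false from by decide]
  rw [this]
  exact rstrip_adr u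

lemma pvValOf_mem {l : List Char} (h : ':' ∈ l) :
    pvValOf l = PySem.Chars.replace (PySem.Chars.strip ((List.dropWhile (fun a => !(a == ':')) l).tail)) ['*'] [] := by
  unfold pvValOf
  rw [splitOnMax_single, if_pos h]

set_option maxHeartbeats 1000000 in
lemma stepA_eq (m : AdrMeta) (raw : List Char) :
    stepA m raw =
      { title := if pvTitlePred (PySem.Chars.strip raw) then (pvTitleOut (PySem.Chars.strip raw)).1 else m.title,
        number := if pvTitlePred (PySem.Chars.strip raw) then (pvTitleOut (PySem.Chars.strip raw)).2 else m.number,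
        status := if pvStatusPred (PySem.Chars.strip raw) then pvStatusOut (PySem.Chars.strip raw) else m.status,
        date := if pvDatePred (PySem.Chars.strip raw) then some (pvStripVal (PySem.Chars.strip raw)) else m.date,
        author := if pvAuthorPred (PySem.Chars.strip raw) then pvStripVal (PySem.Chars.strip raw) else m.author } := by
  unfold stepA
  dsimp only
  set ls := PySem.Chars.strip raw with hls
  by_cases ht : PySem.Chars.startswith ls "# ADR-".toList = true
  · -- H1 branch
    have htp : ("# ADR-".toList).isPrefixOf ls = true := ht
    have hs1 : PySem.Chars.startswith ls "**Status:**".toList = false := prefix_excl htp (by decide) (by decide)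
    have hs2 : PySem.Chars.startswith ls "Status:".toList = false := prefix_excl htp (by decide) (by decide)
    have hd1 : PySem.Chars.startswith ls "**Date:**".toList = false := prefix_excl htp (by decide) (by decide)
    have hd2 : PySem.Chars.startswith ls "Date:".toList = false := prefix_excl htp (by decide) (by decide)
    have ha1 : PySem.Chars.startswith ls "**Decision Maker:**".toList = false := prefix_excl htp (by decide) (by decide)
    have ha2 : PySem.Chars.startswith ls "Decision Maker:".toList = false := prefix_excl htp (by decide) (by decide)
    have ha3 : PySem.Chars.startswith ls "**Author:**".toList = false := prefix_excl htp (by decide) (by decide)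
    have ha4 : PySem.Chars.startswith ls "Author:".toList = false := prefix_excl htp (by decide) (by decide)
    have hps : pvStatusPred ls = false := by
      simp only [pvStatusPred, hs1, hs2, Bool.or_self, Bool.false_and]
    have hpd : pvDatePred ls = false := by
      simp only [pvDatePred, hd1, hd2, Bool.or_self, Bool.false_and]
    have hpa : pvAuthorPred ls = false := by
      simp only [pvAuthorPred, ha1, ha2, ha3, ha4, Bool.or_self, Bool.false_and]
    obtain ⟨t, hteq⟩ := List.isPrefixOf_iff_prefix.mp htp
    have hdrop : ls.drop 2 = "ADR-".toList ++ t := by rw [← hteq]; rfl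
    have hmem : (':' ∈ ls) ↔ (':' ∈ t) := by rw [← hteq]; simp
    rw [if_pos ht]
    simp only [hps, hpd, hpa, Bool.false_eq_true, if_false]
    by_cases hc : ':' ∈ t
    · -- colon present: title and number are written
      have hcls : ':' ∈ ls := hmem.mpr hc
      have hpt : pvTitlePred ls = true := by
        simp [pvTitlePred, PySem.Chars.startswith, isIn_colon, hcls]
        exact List.isPrefixOf_iff_prefix.mp htp
      have hcdrop : ':' ∈ ls.drop 2 := by rw [hdrop]; simp [hc]
      have hadr : ∃ v, PySem.Chars.strip (List.takeWhile (fun a => !(a == ':')) (ls.drop 2)) = "ADR-".toList ++ v := by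
        rw [hdrop]
        have heq : List.takeWhile (fun a => !(a == ':')) ("ADR-".toList ++ t)
            = "ADR-".toList ++ List.takeWhile (fun a => !(a == ':')) t := rfl
        rw [heq]
        exact strip_adr _
      obtain ⟨v, hv⟩ := hadr
      have hsw : PySem.Chars.startswith (PySem.Chars.strip (List.takeWhile (fun a => !(a == ':')) (ls.drop 2))) "ADR-".toList = true := by
        rw [hv]
        simp [PySem.Chars.startswith]
      rw [splitOnMax_single, if_pos hcdrop]
      dsimp only
      rw [if_pos hsw]
      simp only [hpt, if_true]
      unfold pvTitleOut
      rw [splitOnMax_single, if_pos hcdrop]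
    · -- no colon: nothing is written
      have hpt : pvTitlePred ls = false := by
        have hii : PySem.Chars.isIn [':'] ls = false := by rw [isIn_colon]; simp [hmem, hc]
        simp only [pvTitlePred, hii, Bool.and_false]
      have hcdrop : ¬ (':' ∈ ls.drop 2) := by rw [hdrop]; simp [hc]
      rw [splitOnMax_single, if_neg hcdrop]
      simp only [hpt, Bool.false_eq_true, if_false]
  · -- not the H1 branch
    have ht' : PySem.Chars.startswith ls "# ADR-".toList = false := by simpa using ht
    have hpt : pvTitlePred ls = false := by
      simp only [pvTitlePred, ht', Bool.false_and]
    by_cases hst : PySem.Chars.startswith ls "**Status:**".toList = true ∨ PySem.Chars.startswith ls "Status:".toList = true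
    · -- Status branch
      have hcls : ':' ∈ ls := by
        rcases hst with h | h
        · exact mem_of_prefix h (by decide)
        · exact mem_of_prefix h (by decide)
      have hd1 : PySem.Chars.startswith ls "**Date:**".toList = false := by
        rcases hst with h | h
        · exact prefix_excl h (by decide) (by decide)
        · exact prefix_excl h (by decide) (by decide)
      have hd2 : PySem.Chars.startswith ls "Date:".toList = false := by
        rcases hst with h | h
        · exact prefix_excl h (by decide) (by decide)
        · exact prefix_excl h (by decide) (by decide)
      have ha1 : PySem.Chars.startswith ls "**Decision Maker:**".toList = false := by
        rcases hst with h | h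
        · exact prefix_excl h (by decide) (by decide)
        · exact prefix_excl h (by decide) (by decide)
      have ha2 : PySem.Chars.startswith ls "Decision Maker:".toList = false := by
        rcases hst with h | h
        · exact prefix_excl h (by decide) (by decide)
        · exact prefix_excl h (by decide) (by decide)
      have ha3 : PySem.Chars.startswith ls "**Author:**".toList = false := by
        rcases hst with h | h
        · exact prefix_excl h (by decide) (by decide)
        · exact prefix_excl h (by decide) (by decide)
      have ha4 : PySem.Chars.startswith ls "Author:".toList = false := by
        rcases hst with h | h
        · exact prefix_excl h (by decide) (by decide)
        · exact prefix_excl h (by decide) (by decide)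
      have hsb : (PySem.Chars.startswith ls "**Status:**".toList || PySem.Chars.startswith ls "Status:".toList) = true := by
        rcases hst with h | h
        · simp only [h, Bool.true_or]
        · simp only [h, Bool.or_true]
      have hpd : pvDatePred ls = false := by
        simp only [pvDatePred, hd1, hd2, Bool.or_self, Bool.false_and]
      have hpa : pvAuthorPred ls = false := by
        simp only [pvAuthorPred, ha1, ha2, ha3, ha4, Bool.or_self, Bool.false_and]
      have hval := pvValOf_mem hcls
      rw [if_neg ht, if_pos hsb, splitOnMax_single, if_pos hcls]
      dsimp only
      simp only [pvStatusPred, hsb, Bool.true_and, hpt, hpd, hpa, Bool.false_eq_true, if_false]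
      by_cases hemp : PySem.Chars.replace (PySem.Chars.strip ((List.dropWhile (fun a => !(a == ':')) ls).tail)) ['*'] [] = []
      · rw [← hval] at hemp ⊢
        generalize pvValOf ls = v at hemp ⊢
        subst hemp
        simp
      · rw [← hval] at hemp ⊢
        unfold pvStatusOut
        generalize pvValOf ls = v at hemp ⊢
        have hne : (!v.isEmpty) = true := by simp [hemp]
        rw [if_pos hemp, if_pos hne]
        dsimp only
        rw [show (["proposed".toList, "draft".toList, "accepted".toList, "implemented".toList,
            "deprecated".toList, "superseded".toList, "rejected".toList] : List (List Char))
          = ["proposed".toList, "draft".toList, "accepted".toList, "implemented".toList, "deprecated".toList]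
            ++ ["superseded".toList, "rejected".toList] from rfl]
        by_cases c1 : PySem.Chars.lower v ∈ ["proposed".toList, "draft".toList, "accepted".toList, "implemented".toList, "deprecated".toList]
        · rw [if_pos c1, if_pos (List.mem_append.mpr (Or.inl c1))]
        · by_cases c2 : PySem.Chars.lower v ∈ ["superseded".toList, "rejected".toList]
          · rw [if_neg c1, if_pos c2, if_pos (List.mem_append.mpr (Or.inr c2))]
          · rw [if_neg c1, if_neg c2, if_neg (fun hc => (List.mem_append.mp hc).elim c1 c2)]
    · -- not Status
      push Not at hst
      obtain ⟨hst1, hst2⟩ := hst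
      have hs1 : PySem.Chars.startswith ls "**Status:**".toList = false := by simpa using hst1
      have hs2 : PySem.Chars.startswith ls "Status:".toList = false := by simpa using hst2
      have hps : pvStatusPred ls = false := by
        simp only [pvStatusPred, hs1, hs2, Bool.or_self, Bool.false_and]
      by_cases hdt : PySem.Chars.startswith ls "**Date:**".toList = true ∨ PySem.Chars.startswith ls "Date:".toList = true
      · -- Date branch
        have hcls : ':' ∈ ls := by
          rcases hdt with h | h
          · exact mem_of_prefix h (by decide)
          · exact mem_of_prefix h (by decide)
        have ha1 : PySem.Chars.startswith ls "**Decision Maker:**".toList = false := by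
          rcases hdt with h | h
          · exact prefix_excl h (by decide) (by decide)
          · exact prefix_excl h (by decide) (by decide)
        have ha2 : PySem.Chars.startswith ls "Decision Maker:".toList = false := by
          rcases hdt with h | h
          · exact prefix_excl h (by decide) (by decide)
          · exact prefix_excl h (by decide) (by decide)
        have ha3 : PySem.Chars.startswith ls "**Author:**".toList = false := by
          rcases hdt with h | h
          · exact prefix_excl h (by decide) (by decide)
          · exact prefix_excl h (by decide) (by decide)
        have ha4 : PySem.Chars.startswith ls "Author:".toList = false := by
          rcases hdt with h | h
          · exact prefix_excl h (by decide) (by decide)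
          · exact prefix_excl h (by decide) (by decide)
        have hdb : (PySem.Chars.startswith ls "**Date:**".toList || PySem.Chars.startswith ls "Date:".toList) = true := by
          rcases hdt with h | h
          · simp only [h, Bool.true_or]
          · simp only [h, Bool.or_true]
        have hpa : pvAuthorPred ls = false := by
          simp only [pvAuthorPred, ha1, ha2, ha3, ha4, Bool.or_self, Bool.false_and]
        have hval := pvValOf_mem hcls
        rw [if_neg ht,
          if_neg (by simp only [hs1, hs2, Bool.or_self]; exact Bool.false_ne_true :
            ¬ ((PySem.Chars.startswith ls "**Status:**".toList || PySem.Chars.startswith ls "Status:".toList) = true)),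
          if_pos hdb, splitOnMax_single, if_pos hcls]
        dsimp only
        simp only [pvDatePred, hdb, Bool.true_and, hpt, hps, hpa, Bool.false_eq_true, if_false]
        by_cases hemp : PySem.Chars.replace (PySem.Chars.strip ((List.dropWhile (fun a => !(a == ':')) ls).tail)) ['*'] [] = []
        · rw [← hval] at hemp ⊢
          generalize pvValOf ls = v at hemp ⊢
          subst hemp
          simp
        · rw [← hval] at hemp ⊢
          unfold pvStripVal
          generalize pvValOf ls = v at hemp ⊢
          have hne : (!v.isEmpty) = true := by simp [hemp]
          rw [if_pos hemp, if_pos hne]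
      · -- not Date
        push Not at hdt
        obtain ⟨hdt1, hdt2⟩ := hdt
        have hdd1 : PySem.Chars.startswith ls "**Date:**".toList = false := by simpa using hdt1
        have hdd2 : PySem.Chars.startswith ls "Date:".toList = false := by simpa using hdt2
        have hpd : pvDatePred ls = false := by
          simp only [pvDatePred, hdd1, hdd2, Bool.or_self, Bool.false_and]
        by_cases hau : PySem.Chars.startswith ls "**Decision Maker:**".toList = true ∨ PySem.Chars.startswith ls "Decision Maker:".toList = true ∨ PySem.Chars.startswith ls "**Author:**".toList = true ∨ PySem.Chars.startswith ls "Author:".toList = true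
        · -- Author branch
          have hcls : ':' ∈ ls := by
            rcases hau with h | h | h | h
            · exact mem_of_prefix h (by decide)
            · exact mem_of_prefix h (by decide)
            · exact mem_of_prefix h (by decide)
            · exact mem_of_prefix h (by decide)
          have hab : (PySem.Chars.startswith ls "**Decision Maker:**".toList ||
              PySem.Chars.startswith ls "Decision Maker:".toList ||
              PySem.Chars.startswith ls "**Author:**".toList ||
              PySem.Chars.startswith ls "Author:".toList) = true := by
            rcases hau with h | h | h | h <;> simp only [h, Bool.true_or, Bool.or_true]
          have hval := pvValOf_mem hcls
          rw [if_neg ht,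
            if_neg (by simp only [hs1, hs2, Bool.or_self]; exact Bool.false_ne_true :
              ¬ ((PySem.Chars.startswith ls "**Status:**".toList || PySem.Chars.startswith ls "Status:".toList) = true)),
            if_neg (by simp only [hdd1, hdd2, Bool.or_self]; exact Bool.false_ne_true :
              ¬ ((PySem.Chars.startswith ls "**Date:**".toList || PySem.Chars.startswith ls "Date:".toList) = true)),
            if_pos hab, splitOnMax_single, if_pos hcls]
          dsimp only
          simp only [pvAuthorPred, hab, Bool.true_and, hpt, hps, hpd, Bool.false_eq_true, if_false]
          by_cases hemp : PySem.Chars.replace (PySem.Chars.strip ((List.dropWhile (fun a => !(a == ':')) ls).tail)) ['*'] [] = []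
          · rw [← hval] at hemp ⊢
            generalize pvValOf ls = v at hemp ⊢
            subst hemp
            simp
          · rw [← hval] at hemp ⊢
            unfold pvStripVal
            generalize pvValOf ls = v at hemp ⊢
            have hne : (!v.isEmpty) = true := by simp [hemp]
            rw [if_pos hemp, if_pos hne]
        · -- no branch fires
          push Not at hau
          obtain ⟨haa1, haa2, haa3, haa4⟩ := hau
          have g1 : PySem.Chars.startswith ls "**Decision Maker:**".toList = false := by simpa using haa1
          have g2 : PySem.Chars.startswith ls "Decision Maker:".toList = false := by simpa using haa2
          have g3 : PySem.Chars.startswith ls "**Author:**".toList = false := by simpa using haa3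
          have g4 : PySem.Chars.startswith ls "Author:".toList = false := by simpa using haa4
          have hpa : pvAuthorPred ls = false := by
            simp only [pvAuthorPred, g1, g2, g3, g4, Bool.or_self, Bool.false_and]
          rw [if_neg ht,
            if_neg (by simp only [hs1, hs2, Bool.or_self]; exact Bool.false_ne_true :
              ¬ ((PySem.Chars.startswith ls "**Status:**".toList || PySem.Chars.startswith ls "Status:".toList) = true)),
            if_neg (by simp only [hdd1, hdd2, Bool.or_self]; exact Bool.false_ne_true :
              ¬ ((PySem.Chars.startswith ls "**Date:**".toList || PySem.Chars.startswith ls "Date:".toList) = true)),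
            if_neg (by simp only [g1, g2, g3, g4, Bool.or_self]; exact Bool.false_ne_true :
              ¬ ((PySem.Chars.startswith ls "**Decision Maker:**".toList || PySem.Chars.startswith ls "Decision Maker:".toList || PySem.Chars.startswith ls "**Author:**".toList || PySem.Chars.startswith ls "Author:".toList) = true))]
          simp only [hpt, hps, hpd, hpa, Bool.false_eq_true, if_false]

lemma step_title (m : AdrMeta) (raw : List Char) :
    (stepA m raw).title =
      if pvTitlePred (PySem.Chars.strip raw) then (pvTitleOut (PySem.Chars.strip raw)).1
      else m.title := by rw [stepA_eq]

lemma step_number (m : AdrMeta) (raw : List Char) :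
    (stepA m raw).number =
      if pvTitlePred (PySem.Chars.strip raw) then (pvTitleOut (PySem.Chars.strip raw)).2
      else m.number := by rw [stepA_eq]

lemma step_status (m : AdrMeta) (raw : List Char) :
    (stepA m raw).status =
      if pvStatusPred (PySem.Chars.strip raw) then pvStatusOut (PySem.Chars.strip raw)
      else m.status := by rw [stepA_eq]

lemma step_date (m : AdrMeta) (raw : List Char) :
    (stepA m raw).date =
      if pvDatePred (PySem.Chars.strip raw) then some (pvStripVal (PySem.Chars.strip raw))
      else m.date := by rw [stepA_eq]

lemma step_author (m : AdrMeta) (raw : List Char) :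
    (stepA m raw).author =
      if pvAuthorPred (PySem.Chars.strip raw) then pvStripVal (PySem.Chars.strip raw)
      else m.author := by rw [stepA_eq]

-- last-write-wins fold = first match over the reversed stripped lines
lemma foldl_last {σ β : Type} (step : σ → List Char → σ) (proj : σ → β)
    (p : List Char → Bool) (v : List Char → β)
    (h : ∀ m x, proj (step m x) = if p (PySem.Chars.strip x) then v (PySem.Chars.strip x) else proj m) :
    ∀ (xs : List (List Char)) (m : σ),
      proj (xs.foldl step m) =
        match List.find? p ((xs.map PySem.Chars.strip).reverse) with
        | some l => v l
        | none => proj m := by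
  intro xs
  induction xs with
  | nil => intro m; simp
  | cons x xs ih =>
    intro m
    simp only [List.foldl_cons, List.map_cons, List.reverse_cons, List.find?_append]
    rw [ih]
    cases hf : List.find? p (xs.map PySem.Chars.strip).reverse with
    | some l => simp
    | none => simp [h m x]; split <;> simp

-- ===== VERDICT (by name: the statement is the Claim_ definition above) =====
theorem parse_adr_metadata_py_spec : Claim_equal_parse_adr_metadata_py := by
  intro content _
  unfold Spec_parse_adr_metadata_py parse_adr_metadata_py parse_adr_metadata_py_alt pvLines pvLast
  dsimp only
  rw [foldl_last stepA AdrMeta.title pvTitlePred (fun l => (pvTitleOut l).1) step_title,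
      foldl_last stepA AdrMeta.number pvTitlePred (fun l => (pvTitleOut l).2) step_number,
      foldl_last stepA AdrMeta.status pvStatusPred pvStatusOut step_status,
      foldl_last stepA AdrMeta.date pvDatePred (fun l => some (pvStripVal l)) step_date,
      foldl_last stepA AdrMeta.author pvAuthorPred pvStripVal step_author]
  cases List.find? pvTitlePred ((PySem.Chars.splitOn content.toList ['\n']).map PySem.Chars.strip).reverse <;>
  cases List.find? pvStatusPred ((PySem.Chars.splitOn content.toList ['\n']).map PySem.Chars.strip).reverse <;>
  cases List.find? pvDatePred ((PySem.Chars.splitOn content.toList ['\n']).map PySem.Chars.strip).reverse <;>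
  cases List.find? pvAuthorPred ((PySem.Chars.splitOn content.toList ['\n']).map PySem.Chars.strip).reverse <;>
  simp
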